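-- pv_equiv track=rewrite | github.com/samuelleyton2006/Entrega-Gramatica-1 | L(G3)/L(G3).py | es_g3
-- ===== SOURCE A (Python) =====
-- def es_g3(s: str) -> bool:
--     i = 0
--     n = 0
--     L = len(s)
--
--     while i < L and s[i] in ('a', '0'):
--         i += 1
--         n += 1
--
--     if any(ch not in ('b', '1') for ch in s[i:]):
--         return False
--
--     return (L - i) == n + 1
-- ===== SOURCE B (Python) =====
-- def es_g3(s: str) -> bool:
--     A = ('a', '0')
--     B = ('b', '1')
--     if any(c not in A and c not in B for c in s):
--         return False
--     if any(p in B and c in A for p, c in zip(s, s[1:])):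
--         return False
--     na = sum(c in A for c in s)
--     return len(s) - na == na + 1
-- ===== Notes on version B (the rewrite author's own statement) =====
-- stated objective: alternative
-- what changed: Replaced the sequential prefix-counting while-loop plus tail scan with a global check: every character is in {a,0,b,1}, no b-class character is immediately followed by an a-class character, and count(b-class) == count(a-class)+1.
import Mathlib
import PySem

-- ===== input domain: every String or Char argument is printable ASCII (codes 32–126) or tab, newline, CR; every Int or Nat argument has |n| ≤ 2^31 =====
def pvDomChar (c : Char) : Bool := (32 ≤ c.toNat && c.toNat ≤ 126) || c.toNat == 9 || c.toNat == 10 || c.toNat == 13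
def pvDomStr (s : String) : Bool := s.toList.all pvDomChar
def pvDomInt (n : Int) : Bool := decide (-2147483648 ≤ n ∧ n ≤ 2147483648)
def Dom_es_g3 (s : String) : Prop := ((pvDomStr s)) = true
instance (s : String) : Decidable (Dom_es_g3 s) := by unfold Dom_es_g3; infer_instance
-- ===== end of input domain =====

-- B checks global character classes, a no-descent adjacency condition and a count
-- relation instead of A's sequential prefix-counting loop plus tail scan (alternative, same cost).

-- character-class tests shared by both programs ("in ('a','0')" / "in ('b','1')")
def pvIsA (c : Char) : Bool := c = 'a' || c = '0'
def pvIsB (c : Char) : Bool := c = 'b' || c = '1'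

-- ===== PORT A =====
-- A's while loop: advance i and n over the leading a-class prefix; returns (i, n, s[i:])
def pvA_loop : List Char → Int → Int → Int × Int × List Char
  | [], i, n => (i, n, [])
  | c :: cs, i, n => if pvIsA c then pvA_loop cs (i + 1) (n + 1) else (i, n, c :: cs)

def es_g3 (s : String) : Bool :=
  let L : Int := (s.toList.length : Int)
  let r := pvA_loop s.toList 0 0
  if r.2.2.any (fun ch => !pvIsB ch) then false
  else decide (L - r.1 = r.2.1 + 1)

-- ===== PORT B =====
def es_g3_alt (s : String) : Bool :=
  let cs := s.toList
  if cs.any (fun c => !pvIsA c && !pvIsB c) then false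
  else if (cs.zip cs.tail).any (fun pc => pvIsB pc.1 && pvIsA pc.2) then false
  else
    let na : Int := (cs.countP pvIsA : Int)
    decide ((cs.length : Int) - na = na + 1)

-- ===== PRECONDITION & SPEC =====
def Spec_es_g3 (s : String) (out : Bool) : Prop := out = es_g3_alt s
instance (s : String) (out : Bool) : Decidable (Spec_es_g3 s out) := by unfold Spec_es_g3; infer_instance

-- ===== CLAIM (what is proved, stated in full; the proofs are below) =====
def Claim_equal_es_g3 : Prop := ∀ (s : String), Dom_es_g3 s → Spec_es_g3 s (es_g3 s)

-- ===== LEMMAS AND PROOFS =====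

theorem pvIsA_not_B {c : Char} (h : pvIsA c = true) : pvIsB c = false := by
  simp [pvIsA] at h
  rcases h with h | h <;> subst h <;> decide

theorem pvIsB_not_A {c : Char} (h : pvIsB c = true) : pvIsA c = false := by
  simp [pvIsB] at h
  rcases h with h | h <;> subst h <;> decide

theorem pvA_loop_eq (cs : List Char) (i n : Int) :
    pvA_loop cs i n =
      (i + ((cs.takeWhile pvIsA).length : Int),
       n + ((cs.takeWhile pvIsA).length : Int),
       cs.dropWhile pvIsA) := by
  induction cs generalizing i n with
  | nil => simp [pvA_loop]
  | cons c cs ih =>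
    by_cases h : pvIsA c = true
    · simp [pvA_loop, h, ih]
      constructor <;> ring
    · simp at h
      simp [pvA_loop, h]

-- if every char of t is a-class and every char of d is b-class, no b→a adjacency occurs
theorem pv_noBA (t d : List Char)
    (ht : ∀ c ∈ t, pvIsA c = true) (hd : ∀ c ∈ d, pvIsB c = true) :
    ((t ++ d).zip (t ++ d).tail).any (fun pc => pvIsB pc.1 && pvIsA pc.2) = false := by
  induction t with
  | nil =>
    induction d with
    | nil => simp
    | cons x xs ih =>
      cases xs with
      | nil => simp
      | cons y ys =>
        have hy : pvIsA y = false := pvIsB_not_A (hd y (by simp))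
        have rest := ih (fun c hc => hd c (List.mem_cons_of_mem x hc))
        simp only [List.nil_append, List.tail_cons] at rest ⊢
        simp [List.zip_cons_cons, hy, rest]
  | cons a t ih =>
    have ha : pvIsA a = true := ht a (by simp)
    have rest := ih (fun c hc => ht c (by simp [hc]))
    cases h : t ++ d with
    | nil => simp [h]
    | cons y ys =>
      rw [List.cons_append, h, List.tail_cons, List.zip_cons_cons, List.any_cons,
        pvIsA_not_B ha]
      rw [h] at rest
      simpa using rest

-- chain: after a b-class char, with valid chars and no b→a adjacency, all chars are b-class
theorem pv_chain (cs : List Char) (a : Char) (hb : pvIsB a = true)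
    (hv : ∀ c ∈ cs, pvIsA c = true ∨ pvIsB c = true)
    (hz : ((a :: cs).zip cs).any (fun pc => pvIsB pc.1 && pvIsA pc.2) = false) :
    ∀ c ∈ cs, pvIsB c = true := by
  induction cs generalizing a with
  | nil => simp
  | cons y ys ih =>
    simp only [List.zip_cons_cons, List.any_cons, Bool.or_eq_false_iff,
      Bool.and_eq_false_iff] at hz
    have hy : pvIsB y = true := by
      rcases hz.1 with h | h
      · simp [hb] at h
      · rcases hv y (by simp) with h2 | h2
        · simp [h2] at h
        · exact h2
    intro c hc
    rcases List.mem_cons.mp hc with rfl | hc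
    · exact hy
    · exact ih y hy (fun c hc => hv c (by simp [hc])) hz.2 c hc

-- if all chars are valid and there is no b→a adjacency, the drop-block is all b-class
theorem pv_drop_allB (cs : List Char)
    (hv : ∀ c ∈ cs, pvIsA c = true ∨ pvIsB c = true)
    (hz : (cs.zip cs.tail).any (fun pc => pvIsB pc.1 && pvIsA pc.2) = false) :
    ∀ c ∈ cs.dropWhile pvIsA, pvIsB c = true := by
  induction cs with
  | nil => simp
  | cons a cs ih =>
    by_cases ha : pvIsA a = true
    · rw [List.dropWhile_cons_of_pos ha]
      refine ih (fun c hc => hv c (by simp [hc])) ?_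
      cases cs with
      | nil => simp
      | cons y ys =>
        simp only [List.tail_cons, List.zip_cons_cons, List.any_cons,
          Bool.or_eq_false_iff] at hz
        simpa using hz.2
    · have hb : pvIsB a = true := by
        rcases hv a (by simp) with h | h
        · exact absurd h ha
        · exact h
      rw [List.dropWhile_cons_of_neg (by simpa using ha)]
      intro c hc
      rcases List.mem_cons.mp hc with rfl | hc
      · exact hb
      · exact pv_chain cs a hb (fun c hc => hv c (by simp [hc])) (by simpa using hz) c hc

-- a-class count of an a-block++b-block list is the a-block length
theorem pv_countP (t d : List Char)
    (ht : ∀ c ∈ t, pvIsA c = true) (hd : ∀ c ∈ d, pvIsB c = true) :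
    (t ++ d).countP pvIsA = t.length := by
  rw [List.countP_append]
  have h1 : t.countP pvIsA = t.length := List.countP_eq_length.mpr ht
  have h2 : d.countP pvIsA = 0 := by
    rw [List.countP_eq_zero]
    intro c hc
    simpa using pvIsB_not_A (hd c hc)
  omega

-- core equality on the character list
theorem pv_main (cs : List Char) :
    (let L : Int := (cs.length : Int)
     let r := pvA_loop cs 0 0
     if r.2.2.any (fun ch => !pvIsB ch) then false
     else decide (L - r.1 = r.2.1 + 1)) =
    (if cs.any (fun c => !pvIsA c && !pvIsB c) then false
     else if (cs.zip cs.tail).any (fun pc => pvIsB pc.1 && pvIsA pc.2) then false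
     else decide ((cs.length : Int) - (cs.countP pvIsA : Int) = (cs.countP pvIsA : Int) + 1)) := by
  rw [pvA_loop_eq]
  set t := cs.takeWhile pvIsA with hT
  set d := cs.dropWhile pvIsA with hD
  have hcs : t ++ d = cs := List.takeWhile_append_dropWhile
  have ht : ∀ c ∈ t, pvIsA c = true := fun c hc => List.mem_takeWhile_imp hc
  by_cases hall : ∀ c ∈ d, pvIsB c = true
  · -- accepting shape: the tail scan passes on both sides
    have hAny : d.any (fun ch => !pvIsB ch) = false := by
      simp only [List.any_eq_false]
      intro c hc; simpa using hall c hc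
    have hv : cs.any (fun c => !pvIsA c && !pvIsB c) = false := by
      simp only [List.any_eq_false]
      intro c hc
      rcases List.mem_append.mp (hcs ▸ hc) with h | h
      · simp [ht c h]
      · simp [hall c h]
    have hz := pv_noBA t d ht hall
    rw [hcs] at hz
    have hcount : cs.countP pvIsA = t.length := by
      rw [← hcs]; exact pv_countP t d ht hall
    simp only [hAny, hv, hz, hcount]
    simp
  · -- rejecting tail: A returns false; B must fail validity or adjacency
    have hAny : d.any (fun ch => !pvIsB ch) = true := by
      simp only [List.any_eq_true]
      rw [not_forall] at hall
      obtain ⟨c, hc⟩ := hall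
      rw [Classical.not_imp] at hc
      obtain ⟨hc, h⟩ := hc
      exact ⟨c, hc, by simpa using h⟩
    simp only [hAny, if_true]
    by_cases hv : cs.any (fun c => !pvIsA c && !pvIsB c) = true
    · simp [hv]
    · simp only [Bool.not_eq_true] at hv
      by_cases hz : (cs.zip cs.tail).any (fun pc => pvIsB pc.1 && pvIsA pc.2) = true
      · simp [hv, hz]
      · exfalso
        simp only [Bool.not_eq_true] at hz
        have hv' : ∀ c ∈ cs, pvIsA c = true ∨ pvIsB c = true := by
          intro c hc
          have hcv := List.any_eq_false.mp hv c hc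
          cases hA : pvIsA c with
          | true => exact Or.inl rfl
          | false =>
            cases hB : pvIsB c with
            | true => exact Or.inr rfl
            | false => simp [hA, hB] at hcv
        exact absurd (pv_drop_allB cs hv' hz) hall

-- ===== VERDICT (by name: the statement is the Claim_ definition above) =====
theorem es_g3_spec : Claim_equal_es_g3 := by
  intro s _
  unfold Spec_es_g3 es_g3 es_g3_alt
  exact pv_main s.toList
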